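-- pv_equiv track=rewrite | github.com/rotarymars/bf_compiler | bf_to_cpp.py | optimize_loops
-- ===== SOURCE A (Python) =====
-- def optimize_loops(brainfuck_code):
--     """Basic optimization: combine consecutive operations."""
--     optimized = []
--     i = 0
--
--     while i < len(brainfuck_code):
--         char = brainfuck_code[i]
--
--         if char in '+-<>':
--             # Count consecutive operations
--             count = 1
--             while i + count < len(brainfuck_code) and brainfuck_code[i + count] == char:
--                 count += 1
--
--             if count > 1:
--                 # Replace multiple operations with a single optimized one
--                 if char in '+-':
--                     optimized.append(f"{char}{count}")
--                 else:  # <> operations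
--                     optimized.append(f"{char}{count}")
--                 i += count
--             else:
--                 optimized.append(char)
--                 i += 1
--         else:
--             optimized.append(char)
--             i += 1
--
--     return ''.join(optimized)
-- ===== SOURCE B (Python) =====
-- def optimize_loops(brainfuck_code):
--     """Basic optimization: combine consecutive operations."""
--     if not brainfuck_code:
--         return ''
--     n = len(brainfuck_code)
--     # stage 1: run boundaries (indices where the character changes)
--     cuts = [0] + [i for i in range(1, n) if brainfuck_code[i] != brainfuck_code[i - 1]] + [n]
--     # stage 2: map each [a,b) run slice to its encoding
--     parts = []
--     for a, b in zip(cuts, cuts[1:]):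
--         c = brainfuck_code[a]
--         if c in '+-<>' and b - a > 1:
--             parts.append(c + str(b - a))
--         else:
--             parts.append(brainfuck_code[a:b])
--     return ''.join(parts)
-- ===== Notes on version B (the rewrite author's own statement) =====
-- stated objective: alternative
-- what changed: Replaces A's single-pass index walk with an inner counting while-loop by two staged passes: first build the list of run-boundary indices (a comprehension over adjacent character pairs), then map each boundary pair to a slice and encode it.
import Mathlib
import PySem

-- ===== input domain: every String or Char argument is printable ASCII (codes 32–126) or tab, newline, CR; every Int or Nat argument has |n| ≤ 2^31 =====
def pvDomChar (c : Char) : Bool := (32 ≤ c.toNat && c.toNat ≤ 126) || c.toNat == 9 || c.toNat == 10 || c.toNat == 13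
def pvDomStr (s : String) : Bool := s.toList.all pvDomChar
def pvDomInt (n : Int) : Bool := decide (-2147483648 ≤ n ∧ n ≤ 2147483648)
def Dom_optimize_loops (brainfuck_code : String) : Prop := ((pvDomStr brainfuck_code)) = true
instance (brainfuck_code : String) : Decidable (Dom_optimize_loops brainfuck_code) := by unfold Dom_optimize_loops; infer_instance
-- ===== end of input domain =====

-- B replaces A's single index walk with its inner counting while-loop by two staged
-- passes: first a run-boundary index list (a comprehension over adjacent character
-- pairs), then a map over boundary pairs rendering each slice (alternative decomposition; same cost).


-- ===== PORT A =====

-- inner while: number of chars equal to `char` directly following position i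
def pvACount (c : Char) : List Char → Nat
  | [] => 0
  | x :: xs => if x = c then 1 + pvACount c xs else 0

-- outer while over the remaining input (i is represented by the untraversed suffix)
def pvALoop : List Char → List (List Char)
  | [] => []
  | c :: rest =>
    if c = '+' ∨ c = '-' ∨ c = '<' ∨ c = '>' then
      let count := 1 + pvACount c rest
      if count > 1 then
        if c = '+' ∨ c = '-' then
          (c :: PySem.Int.toChars (count : Int)) :: pvALoop (rest.drop (count - 1))
        else
          (c :: PySem.Int.toChars (count : Int)) :: pvALoop (rest.drop (count - 1))
      else
        [c] :: pvALoop rest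
    else
      [c] :: pvALoop rest
termination_by l => l.length
decreasing_by all_goals (simp; try omega)

def optimize_loops (brainfuck_code : String) : String :=
  String.mk (PySem.Chars.join [] (pvALoop brainfuck_code.toList))

-- ===== PORT B =====

-- [i for i in range(1, n) if code[i] != code[i-1]]  (indices as Nat; every index read is in range)
def pvBreaks (l : List Char) : List Nat :=
  (List.range' 1 (l.length - 1)).filter (fun i => l.getD i ' ' != l.getD (i - 1) ' ')

-- cuts = [0] + breaks + [n]
def pvCuts (l : List Char) : List Nat := 0 :: pvBreaks l ++ [l.length]

-- zip(cuts, cuts[1:])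
def pvPairs (xs : List Nat) : List (Nat × Nat) := xs.zip xs.tail

-- the loop body: c = code[a]; encode the run slice code[a:b]
def pvRenderB (l : List Char) (p : Nat × Nat) : List Char :=
  let c := l.getD p.1 ' '
  if (c = '+' ∨ c = '-' ∨ c = '<' ∨ c = '>') ∧ p.2 - p.1 > 1 then
    c :: PySem.Int.toChars ((p.2 - p.1 : Nat) : Int)
  else
    (l.drop p.1).take (p.2 - p.1)

def optimize_loops_alt (brainfuck_code : String) : String :=
  let l := brainfuck_code.toList
  if l = [] then "" else
    String.mk (PySem.Chars.join [] ((pvPairs (pvCuts l)).map (pvRenderB l)))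

-- ===== PRECONDITION & SPEC =====
def Spec_optimize_loops (brainfuck_code : String) (out : String) : Prop := out = optimize_loops_alt brainfuck_code
instance (brainfuck_code : String) (out : String) : Decidable (Spec_optimize_loops brainfuck_code out) := by unfold Spec_optimize_loops; infer_instance

-- ===== CLAIM (what is proved, stated in full; the proofs are below) =====
def Claim_equal_optimize_loops : Prop := ∀ (brainfuck_code : String), Dom_optimize_loops brainfuck_code → Spec_optimize_loops brainfuck_code (optimize_loops brainfuck_code)

-- ===== LEMMAS AND PROOFS =====

-- proof-only normal form: the (char, run-length) maximal runs, and their rendering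
def pvRuns (l : List Char) : List (Char × Nat) :=
  l.foldr (fun c acc =>
    match acc with
    | (c', n) :: t => if c = c' then (c, n + 1) :: t else (c, 1) :: (c', n) :: t
    | [] => [(c, 1)]) []

def pvRender (p : Char × Nat) : List Char :=
  if (p.1 = '+' ∨ p.1 = '-' ∨ p.1 = '<' ∨ p.1 = '>') ∧ p.2 > 1 then
    p.1 :: PySem.Int.toChars (p.2 : Int)
  else
    List.replicate p.2 p.1

theorem pv_join_nil (t : List (List Char)) : PySem.Chars.join [] t = t.flatten := by
  show ([] : List Char).intercalate t = t.flatten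
  induction t with
  | nil => rfl
  | cons a t ih => cases t <;> simp_all [List.intercalate, List.intersperse]

-- if pvACount c rest > 0 then rest starts with c
theorem pvACount_pos (c : Char) (rest : List Char) (h : 0 < pvACount c rest) :
    ∃ rest', rest = c :: rest' ∧ pvACount c rest = 1 + pvACount c rest' := by
  cases rest with
  | nil => simp [pvACount] at h
  | cons x xs =>
    by_cases hx : x = c
    · exact ⟨xs, by rw [hx], by simp [pvACount, hx]⟩
    · simp [pvACount, hx] at h

theorem pvACount_le (c : Char) (rest : List Char) : pvACount c rest ≤ rest.length := by
  induction rest with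
  | nil => simp [pvACount]
  | cons x xs ih => by_cases hx : x = c <;> simp [pvACount, hx] <;> omega

theorem pvACount_take (c : Char) (rest : List Char) :
    rest.take (pvACount c rest) = List.replicate (pvACount c rest) c := by
  induction rest with
  | nil => simp [pvACount]
  | cons x xs ih =>
    by_cases hx : x = c
    · subst hx; simp [pvACount, Nat.add_comm, List.replicate_succ, ih]
    · simp [pvACount, hx]

theorem pvACount_drop_head (c : Char) (rest : List Char) :
    (rest.drop (pvACount c rest))[0]? ≠ some c := by
  induction rest with
  | nil => simp [pvACount]
  | cons x xs ih =>
    by_cases hx : x = c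
    · subst hx; simpa [pvACount, Nat.add_comm] using ih
    · simp [pvACount, hx]

theorem pvBreaks_cons (c : Char) (rest : List Char) :
    pvBreaks (c :: rest) =
      (if rest.drop (pvACount c rest) = [] then [] else
        (pvACount c rest + 1) ::
          (pvBreaks (rest.drop (pvACount c rest))).map (· + (pvACount c rest + 1))) := by
  set k := pvACount c rest with hk
  set r := rest.drop k with hr
  have hkle : k ≤ rest.length := pvACount_le c rest
  have hm : r.length = rest.length - k := by simp [hr]
  -- getElem? facts
  have hget_lo : ∀ i, i ≤ k → (c :: rest)[i]? = some c := by
    intro i hi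
    cases i with
    | zero => simp
    | succ j =>
      have hj : j < k := by omega
      have : rest[j]? = (rest.take k)[j]? := by
        rw [List.getElem?_take]; simp [hj]
      simp only [List.getElem?_cons_succ, this, hk, pvACount_take c rest, List.getElem?_replicate]
      simp [hj]
      omega
  have hget_hi : ∀ j, (c :: rest)[j + (k + 1)]? = r[j]? := by
    intro j
    have h0 : (c :: rest)[j + (k + 1)]? = rest[k + j]? := by
      rw [show j + (k + 1) = (k + j) + 1 by omega]
      simp
    rw [h0, hr, List.getElem?_drop]
  have hgetD : ∀ i d, (c :: rest).getD i d = ((c :: rest)[i]?).getD d :=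
    fun i d => List.getD_eq_getElem?_getD
  have hlen : (c :: rest).length - 1 = k + r.length := by simp [hm]; omega
  rw [pvBreaks, hlen, show List.range' 1 (k + r.length) = List.range' 1 k ++ List.range' (1 + k) r.length from by
    rw [← List.range'_append]; simp, List.filter_append]
  have h1 : (List.range' 1 k).filter (fun i => (c :: rest).getD i ' ' != (c :: rest).getD (i - 1) ' ') = [] := by
    rw [List.filter_eq_nil_iff]
    intro i hi
    rw [List.mem_range'] at hi
    obtain ⟨j, hj, hij⟩ := hi
    have h1 : i ≤ k := by omega
    have h2 : i - 1 ≤ k := by omega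
    simp only [List.getD_eq_getElem?_getD, hget_lo _ h1, hget_lo _ h2]
    simp
  rw [h1]
  cases hre : r with
  | nil => simp [hre]
  | cons h t =>
    have hc : h ≠ c := by
      have := pvACount_drop_head c rest
      rw [← hr, hre] at this; simpa using this
    simp only [hre, List.length_cons, if_neg (by simp : ¬(h :: t = []))]
    rw [show (1 + k) = (k + 1) from by omega, List.range'_succ,
      show (k + 1 + 1) = (k + 2) from by omega]
    rw [List.filter_cons]
    have hhead : ((c :: rest).getD (k + 1) ' ' != (c :: rest).getD (k + 1 - 1) ' ') = true := by
      have e1 : (c :: rest)[k + 1]? = some h := by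
        have := hget_hi 0; rw [hre] at this; simpa using this
      have e2 : (c :: rest)[k]? = some c := hget_lo k (le_refl k)
      simp only [List.getD_eq_getElem?_getD, show k + 1 - 1 = k by omega, e1, e2]
      simpa using hc
    simp only [hhead, if_true, List.nil_append]
    congr 1
    -- remaining: filter over range' (k+2) t.length equals shifted breaks of r
    rw [show List.range' (k + 2) t.length = (List.range' 1 t.length).map (fun x => (k + 1) + x) from by
      have := List.map_add_range' (a := k + 1) 1 t.length 1
      rw [this, show k + 1 + 1 = k + 2 from rfl]]
    rw [List.filter_map]
    have hb : pvBreaks (h :: t) =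
        (List.range' 1 t.length).filter (fun i => (h :: t).getD i ' ' != (h :: t).getD (i - 1) ' ') := by
      rw [pvBreaks]; simp
    rw [hb]
    rw [show (fun x => (k + 1) + x) = (fun x : Nat => x + (k + 1)) from funext fun x => Nat.add_comm _ _]
    congr 1
    apply List.filter_congr
    intro i hi
    rw [List.mem_range'] at hi
    obtain ⟨j, hj, hij⟩ := hi
    have hi1 : 1 ≤ i := by omega
    have e1 : (c :: rest)[i + (k + 1)]? = (h :: t)[i]? := by rw [hget_hi i, hre]
    have e2 : (c :: rest)[i + (k + 1) - 1]? = (h :: t)[i - 1]? := by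
      rw [show i + (k + 1) - 1 = (i - 1) + (k + 1) from by omega, hget_hi (i - 1), hre]
    simp only [Function.comp, List.getD_eq_getElem?_getD, e1, e2]

theorem pvCuts_cons (c : Char) (rest : List Char)
    (hne : rest.drop (pvACount c rest) ≠ []) :
    pvCuts (c :: rest) =
      0 :: (pvCuts (rest.drop (pvACount c rest))).map (· + (pvACount c rest + 1)) := by
  set k := pvACount c rest with hk
  set r := rest.drop k with hr
  have hkle : k ≤ rest.length := pvACount_le c rest
  have hlen : (c :: rest).length = r.length + (k + 1) := by
    simp [hr]; omega
  rw [pvCuts, pvBreaks_cons, if_neg hne, pvCuts]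
  simp [hlen, ← hk, ← hr]

theorem pvCuts_cons_nil (c : Char) (rest : List Char)
    (hnil : rest.drop (pvACount c rest) = []) :
    pvCuts (c :: rest) = [0, pvACount c rest + 1] := by
  have hkle : pvACount c rest ≤ rest.length := pvACount_le c rest
  have hlen : rest.length = pvACount c rest := by
    have := congrArg List.length hnil
    simp at this; omega
  rw [pvCuts, pvBreaks_cons, if_pos hnil]
  simp [hlen]

theorem pvRuns_cons (c : Char) (rest : List Char) :
    pvRuns (c :: rest) =
      (c, 1 + pvACount c rest) :: pvRuns (rest.drop (pvACount c rest)) := by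
  induction rest generalizing c with
  | nil => rfl
  | cons x xs ih =>
    by_cases hx : x = c
    · subst hx
      show (match pvRuns (x :: xs) with
        | (c', n) :: t => if x = c' then (x, n + 1) :: t else (x, 1) :: (c', n) :: t
        | [] => [(x, 1)]) = _
      rw [ih x]
      simp [pvACount, Nat.add_comm]
    · show (match pvRuns (x :: xs) with
        | (c', n) :: t => if c = c' then (c, n + 1) :: t else (c, 1) :: (c', n) :: t
        | [] => [(c, 1)]) = _
      rw [ih x]
      simp [pvACount, hx, Ne.symm hx]
      rw [ih x]

theorem pvShift_get (c : Char) (rest : List Char) (j : Nat) :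
    (c :: rest)[j + (pvACount c rest + 1)]? = (rest.drop (pvACount c rest))[j]? := by
  rw [show j + (pvACount c rest + 1) = (pvACount c rest + j) + 1 from by omega]
  simp [List.getElem?_drop]

theorem pvRenderB_shift (c : Char) (rest : List Char) (a b : Nat) :
    pvRenderB (c :: rest) (a + (pvACount c rest + 1), b + (pvACount c rest + 1)) =
      pvRenderB (rest.drop (pvACount c rest)) (a, b) := by
  set k := pvACount c rest with hk
  have hg : (c :: rest).getD (a + (k + 1)) ' ' = (rest.drop k).getD a ' ' := by
    simp only [List.getD_eq_getElem?_getD, pvShift_get c rest a, hk]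
  have hd : (c :: rest).drop (a + (k + 1)) = (rest.drop k).drop a := by
    rw [show a + (k + 1) = (k + a) + 1 from by omega]
    simp [List.drop_drop, Nat.add_comm]
  have hs : b + (k + 1) - (a + (k + 1)) = b - a := by omega
  simp only [pvRenderB, hg, hd, hs]

theorem pvRenderB_head (c : Char) (rest : List Char) :
    pvRenderB (c :: rest) (0, pvACount c rest + 1) = pvRender (c, pvACount c rest + 1) := by
  set k := pvACount c rest with hk
  have htake : (c :: rest).take (k + 1) = List.replicate (k + 1) c := by
    simp [List.take_succ_cons, hk, pvACount_take c rest, List.replicate_succ]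
  simp only [pvRenderB, pvRender, List.getD_eq_getElem?_getD, List.getElem?_cons_zero,
    Option.getD_some, Nat.sub_zero, List.drop_zero, htake]

theorem pvPairs_map_shift (f : Nat → Nat) (xs : List Nat) :
    pvPairs (xs.map f) = (pvPairs xs).map (fun p => (f p.1, f p.2)) := by
  unfold pvPairs
  rw [show (xs.map f).tail = xs.tail.map f from by cases xs <;> simp]
  rw [List.zip_map]
  simp

theorem pvPairs_cons (x y : Nat) (t : List Nat) :
    pvPairs (x :: y :: t) = (x, y) :: pvPairs (y :: t) := rfl

theorem pv_cuts_main : ∀ (n : Nat) (l : List Char), l.length ≤ n → l ≠ [] →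
    (pvPairs (pvCuts l)).map (pvRenderB l) = (pvRuns l).map pvRender := by
  intro n
  induction n with
  | zero =>
    intro l hl hne
    cases l with
    | nil => exact absurd rfl hne
    | cons c rest => simp at hl
  | succ n ih =>
    intro l hl hne
    cases l with
    | nil => exact absurd rfl hne
    | cons c rest =>
      by_cases hnil : rest.drop (pvACount c rest) = []
      · rw [pvCuts_cons_nil c rest hnil, pvRuns_cons, hnil]
        show [pvRenderB (c :: rest) (0, pvACount c rest + 1)] = _
        rw [pvRenderB_head c rest]
        simp [pvRuns, Nat.add_comm]
      · have hc0 : pvCuts (rest.drop (pvACount c rest)) =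
            0 :: (pvBreaks (rest.drop (pvACount c rest)) ++ [(rest.drop (pvACount c rest)).length]) := rfl
        rw [pvCuts_cons c rest hnil, pvRuns_cons, hc0, List.map_cons, pvPairs_cons,
          ← List.map_cons (f := fun x => x + (pvACount c rest + 1)), ← hc0, List.map_cons,
          pvPairs_map_shift, List.map_map, List.map_cons]
        congr 1
        · rw [show (0 : Nat) + (pvACount c rest + 1) = pvACount c rest + 1 from by omega,
            pvRenderB_head c rest]
          simp [pvRender, Nat.add_comm]
        · rw [show (pvRenderB (c :: rest) ∘ fun p => (p.1 + (pvACount c rest + 1), p.2 + (pvACount c rest + 1)))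
              = pvRenderB (rest.drop (pvACount c rest)) from
            funext fun p => pvRenderB_shift c rest p.1 p.2]
          apply ih
          · have h1 := pvACount_le c rest
            have : (rest.drop (pvACount c rest)).length = rest.length - pvACount c rest := by simp
            simp at hl ⊢
            omega
          · exact hnil
-- a non-op character's whole run renders to plain copies, so consuming it char by
-- char (A) or as a run produces the same flattened output
theorem pv_nonop_run (c : Char) (rest : List Char)
    (hc : ¬(c = '+' ∨ c = '-' ∨ c = '<' ∨ c = '>')) :
    ((pvRuns (c :: rest)).map pvRender).flatten =
      c :: ((pvRuns rest).map pvRender).flatten := by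
  rw [pvRuns_cons]
  rcases Nat.eq_zero_or_pos (pvACount c rest) with h0 | hpos
  · simp [h0, pvRender, hc]
  · obtain ⟨rest', hr, hcnt⟩ := pvACount_pos c rest hpos
    subst hr
    rw [hcnt, pvRuns_cons]
    simp [pvRender, hc, Nat.add_comm, List.replicate_succ]
    rw [show 1 + (pvACount c rest' + 1) = pvACount c rest' + 1 + 1 by omega]
    simp [List.replicate_succ]

-- A's loop output flattens to the runs normal form
theorem pv_main (l : List Char) :
    (pvALoop l).flatten = ((pvRuns l).map pvRender).flatten := by
  induction l using pvALoop.induct with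
  | case1 => simp [pvALoop, pvRuns]
  | case2 c rest hop count hgt hpm ih =>
    have hk : 0 < pvACount c rest := by omega
    rw [show count - 1 = pvACount c rest from by omega] at ih
    rw [pvALoop, pvRuns_cons]
    simp [hop, hpm, pvRender, hk, ih]
  | case3 c rest hop count hgt hpm ih =>
    have hk : 0 < pvACount c rest := by omega
    rw [show count - 1 = pvACount c rest from by omega] at ih
    rw [pvALoop, pvRuns_cons]
    simp [hop, hpm, pvRender, hk, ih]
  | case4 c rest hop count hle ih =>
    have h0 : pvACount c rest = 0 := by omega
    rw [pvALoop, pvRuns_cons]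
    simp [hop, h0, pvRender, ih]
  | case5 c rest hop ih =>
    rw [pvALoop, pv_nonop_run c rest hop]
    simp [hop, ih]


-- ===== VERDICT (by name: the statement is the Claim_ definition above) =====
theorem optimize_loops_spec : Claim_equal_optimize_loops := by
  intro s _
  show optimize_loops s = optimize_loops_alt s
  unfold optimize_loops optimize_loops_alt
  by_cases hnil : s.toList = []
  · rw [hnil]
    simp [pvALoop]
    rfl
  · simp only [if_neg hnil]
    rw [pv_join_nil, pv_join_nil, pv_main,
      pv_cuts_main s.toList.length s.toList (le_refl _) hnil]
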